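-- pv_equiv track=rewrite | github.com/Lamg222/Web-Scraping-with_Python | exercises/solutions/01_primer_scraper_solution.py | analizar_stock
-- ===== SOURCE A (Python) =====
-- from typing import List, Dict
--
-- def analizar_stock(libros: List[Dict]) -> Dict:
--     """
--     Analiza el estado del stock de los libros.
--     """
--     estadisticas = {
--         'total_libros': len(libros),
--         'en_stock': 0,
--         'agotados': 0,
--         'pocas_unidades': 0
--     }
--
--     for libro in libros:
--         if libro['en_stock']:
--             estadisticas['en_stock'] += 1
--             # Verificar si quedan pocas unidades
--             if libro.get('cantidad_stock', 0) < 5 and libro.get('cantidad_stock', 0) > 0: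
--                 estadisticas['pocas_unidades'] += 1
--         else:
--             estadisticas['agotados'] += 1
--
--     return estadisticas
-- ===== SOURCE B (Python) =====
-- from typing import List, Dict
--
-- def analizar_stock(libros: List[Dict]) -> Dict:
--     """
--     Analiza el estado del stock de los libros.
--     """
--     en_stock = sum(1 for libro in libros if libro['en_stock'])
--     pocas_unidades = sum(
--         1 for libro in libros
--         if libro['en_stock'] and 0 < libro.get('cantidad_stock', 0) < 5
--     )
--     return {
--         'total_libros': len(libros),
--         'en_stock': en_stock,
--         'agotados': len(libros) - en_stock,
--         'pocas_unidades': pocas_unidades,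
--     }
-- ===== Notes on version B (the rewrite author's own statement) =====
-- stated objective: idiomatic
-- what changed: Replaces the single branching loop that mutates a statistics dict with per-statistic comprehension-style counts, deriving 'agotados' arithmetically as len(libros) - en_stock instead of counting it.
import Mathlib
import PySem

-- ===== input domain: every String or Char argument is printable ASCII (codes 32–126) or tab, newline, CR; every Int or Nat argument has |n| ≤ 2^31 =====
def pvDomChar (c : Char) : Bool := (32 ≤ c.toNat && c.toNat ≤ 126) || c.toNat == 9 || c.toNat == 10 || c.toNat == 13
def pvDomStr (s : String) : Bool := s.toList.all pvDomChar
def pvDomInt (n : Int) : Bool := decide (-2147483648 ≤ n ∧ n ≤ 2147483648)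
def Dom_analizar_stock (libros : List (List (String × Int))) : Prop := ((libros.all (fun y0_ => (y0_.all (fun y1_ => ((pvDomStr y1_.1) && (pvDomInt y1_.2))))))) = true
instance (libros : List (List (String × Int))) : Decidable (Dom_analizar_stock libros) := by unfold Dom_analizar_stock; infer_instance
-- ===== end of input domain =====

-- B changes only the decomposition (idiomatic per-statistic counts instead of one branching loop); not faster.

-- ===== PORT A =====
-- the body of A's for-loop, updating the estadisticas dict
def pvStepA (est : PySem.Dict String Int) (libro : List (String × Int)) : PySem.Dict String Int :=
  let d := PySem.Dict.ofList libro
  match d.get? "en_stock" with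
  | none => est          -- KeyError in Python; excluded by Pre_
  | some v =>
    if v ≠ 0 then
      let est := est.modify "en_stock" 0 (· + 1)
      if d.getD "cantidad_stock" 0 < 5 ∧ d.getD "cantidad_stock" 0 > 0 then
        est.modify "pocas_unidades" 0 (· + 1)
      else est
    else est.modify "agotados" 0 (· + 1)

def analizar_stock (libros : List (List (String × Int))) : List (String × Int) :=
  let estadisticas : PySem.Dict String Int :=
    ((((PySem.Dict.empty.insert "total_libros" (libros.length : Int)).insert "en_stock" 0).insert "agotados" 0).insert "pocas_unidades" 0)
  (libros.foldl pvStepA estadisticas).items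

-- ===== PORT B =====
def analizar_stock_alt (libros : List (List (String × Int))) : List (String × Int) :=
  let en_stock : Int :=
    (libros.countP (fun l => (PySem.Dict.ofList l).getD "en_stock" 0 != 0) : Int)
  let pocas_unidades : Int :=
    (libros.countP (fun l =>
      let d := PySem.Dict.ofList l
      (d.getD "en_stock" 0 != 0) && (0 < d.getD "cantidad_stock" 0) && (d.getD "cantidad_stock" 0 < 5)) : Int)
  [("total_libros", (libros.length : Int)),
   ("en_stock", en_stock),
   ("agotados", (libros.length : Int) - en_stock),
   ("pocas_unidades", pocas_unidades)]

-- ===== PRECONDITION & SPEC =====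
-- Pre_ excludes books without an 'en_stock' key, on which A (and B) raise KeyError.
def Pre_analizar_stock (libros : List (List (String × Int))) : Prop :=
  libros.all (fun l => (PySem.Dict.ofList l).contains "en_stock") = true
instance (libros : List (List (String × Int))) : Decidable (Pre_analizar_stock libros) := by unfold Pre_analizar_stock; infer_instance
def pvWitness_analizar_stock : (List (List (String × Int))) :=
  [[("en_stock", 1), ("cantidad_stock", 3)], [("en_stock", 0)]]
def Spec_analizar_stock (libros : List (List (String × Int))) (out : List (String × Int)) : Prop := out = analizar_stock_alt libros
instance (libros : List (List (String × Int))) (out : List (String × Int)) : Decidable (Spec_analizar_stock libros out) := by unfold Spec_analizar_stock; infer_instance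

-- ===== CLAIM (what is proved, stated in full; the proofs are below) =====
def Claim_equal_analizar_stock : Prop := ∀ (libros : List (List (String × Int))), Dom_analizar_stock libros → Pre_analizar_stock libros → Spec_analizar_stock libros (analizar_stock libros)

-- ===== LEMMAS AND PROOFS =====

-- the concrete shape of the statistics dict throughout A's loop
def pvD (n e a p : Int) : PySem.Dict String Int :=
  PySem.Dict.mk [("total_libros", n), ("en_stock", e), ("agotados", a), ("pocas_unidades", p)]

def pvTruthy (l : List (String × Int)) : Bool :=
  (PySem.Dict.ofList l).getD "en_stock" 0 != 0

def pvPocas (l : List (String × Int)) : Bool :=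
  let d := PySem.Dict.ofList l
  (d.getD "en_stock" 0 != 0) && (0 < d.getD "cantidad_stock" 0) && (d.getD "cantidad_stock" 0 < 5)

lemma pvStepA_eq (l : List (String × Int))
    (h : (PySem.Dict.ofList l).contains "en_stock" = true) (n e a p : Int) :
    pvStepA (pvD n e a p) l =
      pvD n (e + if pvTruthy l then 1 else 0)
            (a + if pvTruthy l then 0 else 1)
            (p + if pvPocas l then 1 else 0) := by
  rw [PySem.Dict.contains_eq_isSome_get?] at h
  obtain ⟨v, hv⟩ := Option.isSome_iff_exists.mp h
  have hgd : (PySem.Dict.ofList l).getD "en_stock" 0 = v := by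
    simp [PySem.Dict.getD_eq_get?_getD, hv]
  by_cases h0 : v = 0
  · have ht : pvTruthy l = false := by simp [pvTruthy, hgd, h0]
    have hp : pvPocas l = false := by simp [pvPocas, hgd, h0]
    simp only [pvStepA, hv]
    rw [if_neg (not_not_intro h0)]
    simp [ht, hp, pvD, PySem.Dict.modify, PySem.Dict.insert,
      PySem.Dict.getD, PySem.Dict.get?, PySem.Dict.contains]
  · have ht : pvTruthy l = true := by simp [pvTruthy, hgd, h0]
    by_cases hc : 0 < (PySem.Dict.ofList l).getD "cantidad_stock" 0 ∧
        (PySem.Dict.ofList l).getD "cantidad_stock" 0 < 5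
    · have hp : pvPocas l = true := by simp [pvPocas, hgd, h0, hc.1, hc.2]
      have hif : (PySem.Dict.ofList l).getD "cantidad_stock" 0 < 5 ∧
          (PySem.Dict.ofList l).getD "cantidad_stock" 0 > 0 := ⟨hc.2, hc.1⟩
      simp only [pvStepA, hv]
      rw [if_pos h0, if_pos hif]
      simp [ht, hp, pvD, PySem.Dict.modify, PySem.Dict.insert,
        PySem.Dict.getD, PySem.Dict.get?, PySem.Dict.contains]
    · have hp : pvPocas l = false := by
        simp only [pvPocas, hgd, Bool.and_eq_false_iff]
        rcases not_and_or.mp hc with h1 | h2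
        · exact Or.inl (Or.inr (by simpa using h1))
        · exact Or.inr (by simpa using h2)
      have hif : ¬((PySem.Dict.ofList l).getD "cantidad_stock" 0 < 5 ∧
          (PySem.Dict.ofList l).getD "cantidad_stock" 0 > 0) := fun ⟨x, y⟩ => hc ⟨y, x⟩
      simp only [pvStepA, hv]
      rw [if_pos h0, if_neg hif]
      simp [ht, hp, pvD, PySem.Dict.modify, PySem.Dict.insert,
        PySem.Dict.getD, PySem.Dict.get?, PySem.Dict.contains]

lemma pv_fold (libros : List (List (String × Int)))
    (h : libros.all (fun l => (PySem.Dict.ofList l).contains "en_stock") = true)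
    (n e a p : Int) :
    libros.foldl pvStepA (pvD n e a p) =
      pvD n (e + (libros.countP pvTruthy : Int))
            (a + ((libros.length : Int) - (libros.countP pvTruthy : Int)))
            (p + (libros.countP pvPocas : Int)) := by
  induction libros generalizing e a p with
  | nil => simp
  | cons l rest ih =>
    simp only [List.all_cons, Bool.and_eq_true] at h
    rw [List.foldl_cons, pvStepA_eq _ h.1, ih h.2]
    simp only [List.countP_cons, List.length_cons, pvD, PySem.Dict.mk.injEq]
    by_cases ht : pvTruthy l <;> by_cases hp : pvPocas l <;>
      simp [ht, hp] <;> omega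

-- ===== VERDICT (by name: the statement is the Claim_ definition above) =====
theorem analizar_stock_spec : Claim_equal_analizar_stock := by
  intro libros _ hpre
  show _ = _
  simp only [analizar_stock, analizar_stock_alt]
  have hinit : ((((PySem.Dict.empty.insert "total_libros" ((libros.length : Nat) : Int)).insert "en_stock" 0).insert "agotados" 0).insert "pocas_unidades" 0) = pvD (libros.length : Int) 0 0 0 := by
    rfl
  rw [hinit, pv_fold libros hpre]
  simp only [pvD]
  norm_num
  exact ⟨rfl, rfl⟩
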